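-- pv_equiv track=rewrite | github.com/CoBiG2/RAD_Tools | VCF2phy.py | mask_alignment
-- ===== SOURCE A (Python) =====
-- from collections import defaultdict, OrderedDict
--
-- def mask_alignment(aln, var_positions):
-- 	"""
-- 	Parses an alignment in an OrderedDict format {taxon: seq} and returns a
-- 	similar alignment OrderedDict with the variable positions not present in the
-- 	var_positions list masked
-- 	"""
--
-- 	masked_dic = OrderedDict((tx, []) for tx in aln)
--
-- 	for p, column in enumerate(zip(*aln.values())):
--
-- 		gapless_column = len(set([x for x in column if x.lower() not in ["-", "n"]]))
--
-- 		# If this represents a real variable position or a column with no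
-- 		# variation (excluding missing data), save sequences as they
-- 		# are
-- 		if p in var_positions or (column not in var_positions and
-- 							      gapless_column == 1):
--
-- 			# This appends the existing nucleotide of each taxon to its
-- 			# corresponding taxon in masked_dic
-- 			list(map(lambda char, tx: masked_dic[tx].append(char),
-- 			                column, list(aln.keys())))
--
-- 		elif p not in var_positions and gapless_column > 1:
--
-- 			# This appends an "n" to each taxon in masked_dic
-- 			list(map(lambda tx: masked_dic[tx].append("n"), list(aln.keys())))
--
-- 	masked_dic = OrderedDict((tx, "".join(seq)) for tx, seq in masked_dic.items())
--
-- 	return masked_dic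
-- ===== SOURCE B (Python) =====
-- from collections import OrderedDict
--
-- KEEP, MASK, DROP = 1, 2, 0
--
--
-- def mask_alignment(aln, var_positions):
--     """Row-major re-implementation: never transposes the alignment. A first
--     pass over the rows accumulates, for every position, the set of distinct
--     non-gap characters; positions are then labelled KEEP / MASK / DROP, and a
--     second row-major pass renders each taxon's sequence from its own row and
--     the labels."""
--
--     seqs = list(aln.values())
--     ncols = min((len(s) for s in seqs), default=0)
--
--     # Pass 1 (row-major): distinct non-gap characters seen at each position.
--     sets = [set() for _ in range(ncols)]
--     for seq in seqs:
--         for st, ch in zip(sets, seq):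
--             if ch.lower() not in ("-", "n"):
--                 st.add(ch)
--
--     labels = [KEEP if p in var_positions or len(st) == 1
--               else (MASK if len(st) > 1 else DROP)
--               for p, st in enumerate(sets)]
--
--     # Pass 2 (row-major): each taxon's output from its own row and the labels.
--     out = OrderedDict()
--     for tx, seq in aln.items():
--         chars = []
--         for ch, lab in zip(seq, labels):
--             if lab == KEEP:
--                 chars.append(ch)
--             elif lab == MASK:
--                 chars.append("n")
--         out[tx] = "".join(chars)
--     return out
-- ===== Notes on version B (the rewrite author's own statement) =====
-- stated objective: alternative
-- what changed: A transposes the alignment with zip(*) and, per column, distributes characters into per-taxon accumulator lists by dict mutation; B never transposes: one row-major pass accumulates per-position character sets, positions are labelled keep/mask/drop, and a second row-major pass renders each taxon's string from its own row and the label table. (constant-factor win: no tuple-per-column construction and no per-character dict lookups)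
import Mathlib
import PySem

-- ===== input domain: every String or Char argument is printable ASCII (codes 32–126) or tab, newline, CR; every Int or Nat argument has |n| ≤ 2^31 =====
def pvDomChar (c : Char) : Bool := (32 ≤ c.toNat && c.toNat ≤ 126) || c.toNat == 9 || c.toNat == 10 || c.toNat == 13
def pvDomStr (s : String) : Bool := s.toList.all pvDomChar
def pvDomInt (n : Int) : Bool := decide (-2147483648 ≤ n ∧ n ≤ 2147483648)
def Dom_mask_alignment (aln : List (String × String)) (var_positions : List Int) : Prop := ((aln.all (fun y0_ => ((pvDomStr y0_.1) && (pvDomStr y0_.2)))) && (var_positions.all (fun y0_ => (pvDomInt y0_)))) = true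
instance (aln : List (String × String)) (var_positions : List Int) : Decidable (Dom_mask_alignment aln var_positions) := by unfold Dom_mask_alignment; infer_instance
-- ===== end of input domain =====

-- B is a row-major re-implementation: instead of transposing the alignment and distributing
-- each surviving column into per-taxon dict accumulators (A), B accumulates per-position
-- character sets row by row, labels every position keep/mask/drop, and renders each taxon's
-- string from its own row and that label table; same cost, different traversal.
-- The aln parameter models a Python OrderedDict: both ports normalise the association list
-- with PySem.Dict.ofList (last value, first position per key), exactly as Python dict
-- construction does before the function runs.

-- ===== PORT A =====

/-- zip(*seqs): the columns, truncated to the shortest sequence; no columns when seqs is empty. -/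
def pyZipStar (seqs : List (List Char)) : List (List Char) :=
  match seqs with
  | [] => []
  | s :: rest =>
      (List.range (rest.foldl (fun m t => min m t.length) s.length)).map
        (fun p => (s :: rest).map (fun t => t.getD p ' '))

/-- len(set([x for x in column if x.lower() not in ["-", "n"]])) -/
def gaplessCount (column : List Char) : Int :=
  PySem.Set.len (PySem.Set.ofList (column.filter
    (fun x => !(PySem.Chars.lowerChar x == '-' || PySem.Chars.lowerChar x == 'n'))))

/-- Body of A's per-column loop.  Python's `column not in var_positions` is always True
    (a tuple of characters never equals an int), so it is ported as the True it evaluates to. -/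
def maskStepA (var_positions : List Int) (taxa : List String)
    (d : PySem.Dict String (List Char)) (pc : Int × List Char) :
    PySem.Dict String (List Char) :=
  let gapless := gaplessCount pc.2
  if pc.1 ∈ var_positions ∨ gapless = 1 then
    -- list(map(lambda char, tx: masked_dic[tx].append(char), column, list(aln.keys())))
    (pc.2.zip taxa).foldl (fun d ct => d.modify ct.2 [] (· ++ [ct.1])) d
  else if gapless > 1 then
    -- list(map(lambda tx: masked_dic[tx].append("n"), list(aln.keys())))
    taxa.foldl (fun d tx => d.modify tx [] (· ++ ['n'])) d
  else d

def mask_alignment (aln : List (String × String)) (var_positions : List Int) :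
    List (String × String) :=
  let alnD : PySem.Dict String String := PySem.Dict.ofList aln
  -- masked_dic = OrderedDict((tx, []) for tx in aln)
  let masked0 : PySem.Dict String (List Char) :=
    alnD.keys.foldl (fun d tx => d.insert tx []) PySem.Dict.empty
  let masked :=
    (PySem.List.enumerate (pyZipStar (alnD.values.map String.toList))).foldl
      (maskStepA var_positions alnD.keys) masked0
  -- OrderedDict((tx, "".join(seq)) for tx, seq in masked_dic.items())
  masked.items.map (fun ts => (ts.1, String.ofList ts.2))

-- ===== PORT B =====

/-- ch.lower() not in ("-", "n") -/
def keepChar (x : Char) : Bool :=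
  !(PySem.Chars.lowerChar x == '-' || PySem.Chars.lowerChar x == 'n')

/-- One row of B's first pass: `for st, ch in zip(sets, seq): if …: st.add(ch)`. -/
def addRow (sets : List (PySem.Set Char)) (seq : List Char) : List (PySem.Set Char) :=
  List.zipWith (fun st ch => if keepChar ch then PySem.Set.add st ch else st) sets seq

/-- ncols = min((len(s) for s in seqs), default=0) -/
def minLen (seqs : List (List Char)) : Nat :=
  match seqs with
  | [] => 0
  | s :: rest => rest.foldl (fun m t => min m t.length) s.length

/-- KEEP (1) if p in var_positions or len(st) == 1 else (MASK (2) if len(st) > 1 else DROP (0)). -/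
def colLabel (var_positions : List Int) (ps : Int × PySem.Set Char) : Nat :=
  if ps.1 ∈ var_positions ∨ PySem.Set.len ps.2 = 1 then 1
  else if PySem.Set.len ps.2 > 1 then 2 else 0

/-- B's second pass for one taxon: `for ch, lab in zip(seq, labels): …`. -/
def renderRow (labels : List Nat) (seq : List Char) : List Char :=
  (seq.zip labels).foldl (fun acc cl =>
    if cl.2 = 1 then acc ++ [cl.1] else if cl.2 = 2 then acc ++ ['n'] else acc) []

def mask_alignment_alt (aln : List (String × String)) (var_positions : List Int) :
    List (String × String) :=
  let alnD : PySem.Dict String String := PySem.Dict.ofList aln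
  let seqs := alnD.values.map String.toList
  -- Pass 1 (row-major): accumulate per-position character sets, then the label table
  let sets := seqs.foldl addRow (List.replicate (minLen seqs) PySem.Set.empty)
  let labels := (PySem.List.enumerate sets).map (colLabel var_positions)
  -- Pass 2 (row-major): each taxon's output from its own row and the labels
  alnD.items.map (fun ts => (ts.1, String.ofList (renderRow labels ts.2.toList)))

-- ===== PRECONDITION & SPEC =====
def Spec_mask_alignment (aln : List (String × String)) (var_positions : List Int) (out : List (String × String)) : Prop := out = mask_alignment_alt aln var_positions
instance (aln : List (String × String)) (var_positions : List Int) (out : List (String × String)) : Decidable (Spec_mask_alignment aln var_positions out) := by unfold Spec_mask_alignment; infer_instance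

-- ===== CLAIM (what is proved, stated in full; the proofs are below) =====
def Claim_equal_mask_alignment : Prop := ∀ (aln : List (String × String)) (var_positions : List Int), Dom_mask_alignment aln var_positions → Spec_mask_alignment aln var_positions (mask_alignment aln var_positions)

-- ===== LEMMAS AND PROOFS =====

/-- What each enumerated column contributes: the column itself, an all-'n' column, or nothing. -/
def classifyCol (var_positions : List Int) (ntaxa : Nat) (pc : Int × List Char) :
    Option (List Char) :=
  if pc.1 ∈ var_positions ∨ gaplessCount pc.2 = 1 then some pc.2
  else if gaplessCount pc.2 > 1 then some (List.replicate ntaxa 'n')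
  else none

/-- Proof-only intermediate form: the kept/masked columns, re-read per taxon by index. -/
def colFormResult (aln : List (String × String)) (var_positions : List Int) :
    List (String × String) :=
  let alnD : PySem.Dict String String := PySem.Dict.ofList aln
  let taxa := alnD.keys
  let kept := (PySem.List.enumerate (pyZipStar (alnD.values.map String.toList))).filterMap
      (classifyCol var_positions taxa.length)
  (PySem.List.enumerate taxa).map
    (fun jt => (jt.2, String.ofList (kept.map (fun col => col.getD jt.1.toNat 'n'))))

/-- Fold the kept columns into per-taxon accumulators, column by column. -/
def combineCols (accs : List (List Char)) : List (List Char) → List (List Char)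
  | [] => accs
  | k :: ks => combineCols (List.zipWith (fun a c => a ++ [c]) accs k) ks

theorem zip_replicate_fst {α β : Type} (c : α) (l : List β) :
    (List.replicate l.length c).zip l = l.map (fun t => (c, t)) := by
  induction l with
  | nil => rfl
  | cons t ts ih => simp [List.replicate_succ, ih]

theorem zip_replicate_snd {α β : Type} (l : List α) (a : β) :
    l.zip (List.replicate l.length a) = l.map (fun t => (t, a)) := by
  induction l with
  | nil => rfl
  | cons t ts ih => simp [List.replicate_succ, ih]

/-- One column distributed by key-wise dict appends acts positionally on a nodup-keyed block. -/
theorem distrib_col (txs : List String) :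
    ∀ (col : List Char) (accs : List (List Char)) (pre : List (String × List Char)),
    txs.Nodup → (∀ t ∈ txs, t ∉ pre.map Prod.fst) →
    col.length = txs.length → accs.length = txs.length →
    (col.zip txs).foldl (fun d ct => d.modify ct.2 [] (· ++ [ct.1]))
        (PySem.Dict.mk (pre ++ txs.zip accs))
      = PySem.Dict.mk (pre ++ txs.zip (List.zipWith (fun a c => a ++ [c]) accs col)) := by
  induction txs with
  | nil =>
    intro col accs pre _ _ hlen halen
    simp_all [List.length_eq_zero_iff.mp hlen, List.length_eq_zero_iff.mp halen]
  | cons t ts ih =>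
    intro col accs pre hnd hpre hlen halen
    cases col with
    | nil => simp at hlen
    | cons c cs =>
      cases accs with
      | nil => simp at halen
      | cons a as =>
        simp only [List.zip_cons_cons, List.foldl_cons, List.zipWith_cons_cons]
        have hstep :
            (PySem.Dict.mk (pre ++ (t, a) :: ts.zip as)).modify t [] (· ++ [c])
              = PySem.Dict.mk (pre ++ (t, a ++ [c]) :: ts.zip as) := by
          have htpre : t ∉ pre.map Prod.fst := hpre t (by simp)
          have htts : t ∉ ts := (List.nodup_cons.mp hnd).1
          have hfind : List.find? (fun p => p.1 == t) (pre ++ (t, a) :: ts.zip as)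
              = some (t, a) := by
            rw [List.find?_append]
            have : List.find? (fun p => p.1 == t) pre = none := by
              rw [List.find?_eq_none]
              intro x hx
              simp only [beq_iff_eq]
              exact fun h => htpre (h ▸ List.mem_map_of_mem hx)
            simp [this]
          have hcon : (PySem.Dict.mk (pre ++ (t, a) :: ts.zip as)).contains t = true := by
            simp [PySem.Dict.contains]
          simp only [PySem.Dict.modify, PySem.Dict.getD, PySem.Dict.get?,
            hfind, Option.map_some, Option.getD_some, PySem.Dict.insert, hcon, if_pos]
          congr 1
          rw [List.map_append, List.map_cons]
          simp only [beq_self_eq_true, if_pos]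
          congr 1
          · apply List.map_congr_left ?_ |>.trans (List.map_id _)
            intro x hx
            have : x.1 ≠ t := fun h => htpre (h ▸ List.mem_map_of_mem hx)
            simp [this]
          · congr 1
            apply List.map_congr_left ?_ |>.trans (List.map_id _)
            intro x hx
            have hx1 : x.1 ∈ ts := by
              have := List.map_fst_zip (l₁ := ts) (l₂ := as) (by simp_all)
              rw [← this]
              exact List.mem_map_of_mem hx
            have : x.1 ≠ t := fun h => htts (h ▸ hx1)
            simp [this]
        rw [hstep, List.append_cons _ (t, a ++ [c])]
        rw [ih cs as (pre ++ [(t, a ++ [c])]) (List.nodup_cons.mp hnd).2 ?_ (by simpa using hlen)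
          (by simpa using halen)]
        · simp
        · intro u hu
          simp only [List.map_append, List.mem_append, List.map_cons, List.mem_cons]
          rintro (h | h)
          · exact hpre u (List.mem_cons_of_mem _ hu) h
          · have : u ≠ t := fun h' => (List.nodup_cons.mp hnd).1 (h' ▸ hu)
            simp_all

/-- A's whole column loop, on a block dict, computes `combineCols` of the classified columns. -/
theorem outer_fold (var_positions : List Int) (txs : List String) (hnd : txs.Nodup) :
    ∀ (ecols : List (Int × List Char)) (accs : List (List Char)),
    (∀ pc ∈ ecols, pc.2.length = txs.length) → accs.length = txs.length →
    ecols.foldl (maskStepA var_positions txs) (PySem.Dict.mk (txs.zip accs))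
      = PySem.Dict.mk (txs.zip
          (combineCols accs (ecols.filterMap (classifyCol var_positions txs.length)))) := by
  intro ecols
  induction ecols with
  | nil => intro accs _ _; rfl
  | cons pc rest ih =>
    intro accs hcols halen
    have hd : ∀ col : List Char, col.length = txs.length →
        (col.zip txs).foldl (fun d ct => d.modify ct.2 [] (· ++ [ct.1]))
          (PySem.Dict.mk (txs.zip accs))
        = PySem.Dict.mk (txs.zip (List.zipWith (fun a c => a ++ [c]) accs col)) := by
      intro col hc
      simpa using distrib_col txs col accs [] hnd (by simp) hc halen
    have hzlen : ∀ col : List Char, col.length = txs.length →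
        (List.zipWith (fun a c => a ++ [c]) accs col).length = txs.length := by
      intro col hc; simp [halen, hc]
    simp only [List.foldl_cons, List.filterMap_cons, maskStepA, classifyCol]
    split_ifs with h1 h2
    · rw [hd pc.2 (hcols pc (by simp))]
      rw [ih _ (fun q hq => hcols q (by simp [hq])) (hzlen _ (hcols pc (by simp)))]
      rfl
    · have hrep : (List.replicate txs.length 'n').zip txs = txs.map (fun t => ('n', t)) :=
        zip_replicate_fst _ _
      have : txs.foldl (fun d tx => d.modify tx [] (· ++ ['n']))
          (PySem.Dict.mk (txs.zip accs))
          = ((List.replicate txs.length 'n').zip txs).foldl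
              (fun d ct => d.modify ct.2 [] (· ++ [ct.1])) (PySem.Dict.mk (txs.zip accs)) := by
        rw [hrep, List.foldl_map]
      rw [this, hd _ (by simp)]
      rw [ih _ (fun q hq => hcols q (by simp [hq])) (hzlen _ (by simp))]
      rfl
    · exact ih _ (fun q hq => hcols q (by simp [hq])) halen

/-- Column-major characterisation of `combineCols`. -/
theorem combineCols_spec : ∀ (ks accs : List (List Char)),
    (∀ k ∈ ks, k.length = accs.length) →
    combineCols accs ks
      = (accs.zipIdx).map (fun aj => aj.1 ++ ks.map (fun k => k.getD aj.2 'n')) := by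
  intro ks
  induction ks with
  | nil =>
    intro accs _
    apply List.ext_getElem (by simp [combineCols])
    intro i h1 h2
    simp [combineCols]
  | cons k ks ih =>
    intro accs h
    have hk : k.length = accs.length := h k (by simp)
    have hcc : combineCols accs (k :: ks)
        = combineCols (List.zipWith (fun a c => a ++ [c]) accs k) ks := rfl
    rw [hcc, ih _ (by intro k' hk'; simp [h k' (by simp [hk']), hk])]
    apply List.ext_getElem (by simp [hk])
    intro i h1 h2
    have hi : i < accs.length := by simp [hk] at h1 ⊢; omega
    have hik : i < k.length := by omega
    simp [List.getElem_zipIdx, List.getElem?_eq_getElem hik]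

theorem length_mem_pyZipStar (seqs : List (List Char)) :
    ∀ col ∈ pyZipStar seqs, col.length = seqs.length := by
  cases seqs with
  | nil => simp [pyZipStar]
  | cons s rest =>
    intro col hcol
    simp only [pyZipStar, List.mem_map] at hcol
    obtain ⟨p, -, rfl⟩ := hcol
    simp

/-- A equals the proof-only column-table form. -/
theorem a_eq_colForm (aln : List (String × String)) (var_positions : List Int) :
    mask_alignment aln var_positions = colFormResult aln var_positions := by
  simp only [mask_alignment, colFormResult]
  set alnD : PySem.Dict String String := PySem.Dict.ofList aln with halnD
  set txs := alnD.keys with htxs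
  have hnd : txs.Nodup := PySem.Dict.nodup_keys_ofList aln
  set seqs := alnD.values.map String.toList with hseqs
  have hslen : seqs.length = txs.length := by
    simp [hseqs, htxs, PySem.Dict.keys, PySem.Dict.values]
  set ecols := PySem.List.enumerate (pyZipStar seqs) with hecols
  have hcols : ∀ pc ∈ ecols, pc.2.length = txs.length := by
    intro pc hpc
    rw [hecols, PySem.List.mem_enumerate_iff] at hpc
    obtain ⟨k, hk, rfl⟩ := hpc
    exact hslen ▸ length_mem_pyZipStar seqs _ (List.getElem_mem _)
  have h0 : txs.foldl (fun d tx => d.insert tx ([] : List Char)) PySem.Dict.empty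
      = PySem.Dict.mk (txs.zip (List.replicate txs.length [])) := by
    apply PySem.Dict.ext
    have := PySem.Dict.items_foldl_insert_fresh (ν := List Char) txs id (fun _ => [])
      PySem.Dict.empty (by intro a _; exact PySem.Dict.contains_empty a)
      (by simpa using hnd)
    simpa [zip_replicate_snd] using this
  rw [h0]
  set kept := ecols.filterMap (classifyCol var_positions txs.length) with hkept
  have hklen : ∀ k ∈ kept, k.length = (List.replicate txs.length ([] : List Char)).length := by
    intro k hk
    rw [hkept, List.mem_filterMap] at hk
    obtain ⟨pc, hpc, hcl⟩ := hk
    unfold classifyCol at hcl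
    split_ifs at hcl with h1 h2
    · cases hcl; simpa using hcols pc hpc
    · cases hcl; simp
  rw [outer_fold var_positions txs hnd ecols _ hcols (by simp)]
  rw [combineCols_spec kept _ hklen]
  apply List.ext_getElem
  · simp [PySem.List.length_enumerate]
  · intro i h1 h2
    have hi : i < txs.length := by
      simpa [PySem.List.length_enumerate] using h2
    simp only [List.getElem_map, List.getElem_zip, List.getElem_zipIdx,
      PySem.List.getElem_enumerate]
    simp

/-- foldl with a conditional add = foldl add over the filtered list. -/
theorem foldl_cond_add (p : Char → Bool) :
    ∀ (l : List Char) (s : PySem.Set Char),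
    l.foldl (fun st ch => if p ch then PySem.Set.add st ch else st) s
      = (l.filter p).foldl PySem.Set.add s := by
  intro l
  induction l with
  | nil => intro s; rfl
  | cons c cs ih =>
    intro s
    by_cases h : p c <;> simp [h, ih]

theorem foldl_render_acc (acc : List Char) (l : List (Char × Nat)) :
    l.foldl (fun acc cl =>
        if cl.2 = 1 then acc ++ [cl.1] else if cl.2 = 2 then acc ++ ['n'] else acc) acc
      = acc ++ l.filterMap (fun cl =>
          if cl.2 = 1 then some cl.1 else if cl.2 = 2 then some 'n' else none) := by
  induction l generalizing acc with
  | nil => simp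
  | cons x xs ih =>
    simp only [List.foldl_cons, List.filterMap_cons]
    split_ifs with h1 h2 <;> simp [ih]

/-- renderRow as a filterMap over the zipped row. -/
theorem renderRow_eq_filterMap (labels : List Nat) (seq : List Char) :
    renderRow labels seq
      = (seq.zip labels).filterMap (fun cl =>
          if cl.2 = 1 then some cl.1 else if cl.2 = 2 then some 'n' else none) := by
  unfold renderRow
  simpa using foldl_render_acc [] (seq.zip labels)

theorem foldl_min_le_init (rest : List (List Char)) :
    ∀ m : Nat, rest.foldl (fun m t => min m t.length) m ≤ m := by
  induction rest with
  | nil => intro m; simp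
  | cons t ts ih =>
    intro m
    exact le_trans (ih _) (min_le_left _ _)

theorem foldl_min_le_mem (rest : List (List Char)) :
    ∀ (m : Nat) (t : List Char), t ∈ rest →
      rest.foldl (fun m t => min m t.length) m ≤ t.length := by
  induction rest with
  | nil => simp
  | cons u us ih =>
    intro m t ht
    rcases List.mem_cons.mp ht with rfl | ht
    · exact le_trans (foldl_min_le_init us _) (min_le_right _ _)
    · exact ih _ t ht

theorem minLen_le (seqs : List (List Char)) :
    ∀ t ∈ seqs, minLen seqs ≤ t.length := by
  cases seqs with
  | nil => simp
  | cons s rest =>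
    intro t ht
    rcases List.mem_cons.mp ht with rfl | ht
    · exact foldl_min_le_init rest _
    · exact foldl_min_le_mem rest _ t ht

/-- Pointwise description of B's first pass. -/
theorem foldl_addRow_get (seqs : List (List Char)) :
    ∀ (sets0 : List (PySem.Set Char)),
    (∀ s ∈ seqs, sets0.length ≤ s.length) →
    (seqs.foldl addRow sets0).length = sets0.length ∧
    ∀ p : Nat, p < sets0.length →
      (seqs.foldl addRow sets0).getD p PySem.Set.empty
        = (seqs.map (fun t => t.getD p ' ')).foldl
            (fun st ch => if keepChar ch then PySem.Set.add st ch else st)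
            (sets0.getD p PySem.Set.empty) := by
  induction seqs with
  | nil => intro sets0 _; exact ⟨rfl, fun p hp => rfl⟩
  | cons s rest ih =>
    intro sets0 hle
    have hs : sets0.length ≤ s.length := hle s (by simp)
    have hlen1 : (addRow sets0 s).length = sets0.length := by
      simp [addRow]; omega
    obtain ⟨hl, hg⟩ := ih (addRow sets0 s)
      (fun t ht => hlen1 ▸ hle t (by simp [ht]))
    refine ⟨by simpa [hlen1] using hl, ?_⟩
    intro p hp
    have hp1 : p < (addRow sets0 s).length := by omega
    rw [List.foldl_cons, hg p hp1, List.map_cons, List.foldl_cons]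
    have hps : p < s.length := by omega
    have hstep : (addRow sets0 s).getD p PySem.Set.empty
        = (if keepChar (s.getD p ' ') then
            PySem.Set.add (sets0.getD p PySem.Set.empty) (s.getD p ' ')
          else sets0.getD p PySem.Set.empty) := by
      simp [addRow, List.getD, List.getElem?_zipWith,
        List.getElem?_eq_getElem hp, List.getElem?_eq_getElem hps]
    rw [hstep]

/-- The core: per taxon j, the kept-column readout equals B's row render. -/
theorem core_eq (vp : List Int) (seqs : List (List Char)) (n : Nat) (hn : n = seqs.length)
    (j : Nat) (hj : j < seqs.length) :
    ((PySem.List.enumerate (pyZipStar seqs)).filterMap (classifyCol vp n)).map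
        (fun col => col.getD j 'n')
      = renderRow ((PySem.List.enumerate (seqs.foldl addRow
            (List.replicate (minLen seqs) PySem.Set.empty))).map (colLabel vp))
          (seqs.getD j []) := by
  obtain ⟨s, rest, rfl⟩ : ∃ s rest, seqs = s :: rest := by
    cases seqs with
    | nil => simp at hj
    | cons s rest => exact ⟨s, rest, rfl⟩
  set seqs := s :: rest with hseqs
  set L := minLen seqs with hL
  have hLdef : pyZipStar seqs
      = (List.range L).map (fun p => seqs.map (fun t => t.getD p ' ')) := rfl
  have hLle : ∀ t ∈ seqs, L ≤ t.length := minLen_le seqs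
  -- the sets
  set sets := seqs.foldl addRow (List.replicate L PySem.Set.empty) with hsets
  obtain ⟨hsetsLen, hsetsGet⟩ := foldl_addRow_get seqs (List.replicate L PySem.Set.empty)
    (by intro t ht; simpa using hLle t ht)
  have hsetsLen' : sets.length = L := by simpa using hsetsLen
  have glen : ∀ p : Nat, p < L →
      PySem.Set.len (sets.getD p PySem.Set.empty)
        = gaplessCount (seqs.map (fun t => t.getD p ' ')) := by
    intro p hp
    rw [hsets, hsetsGet p (by simpa using hp)]
    rw [foldl_cond_add]
    simp only [gaplessCount, PySem.Set.ofList_eq_foldl]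
    congr 2
    simp [List.getD_eq_getElem?_getD, hp, PySem.Set.empty]
  -- labels
  set labels := (PySem.List.enumerate sets).map (colLabel vp) with hlabels
  have hlabLen : labels.length = L := by
    simp [hlabels, PySem.List.length_enumerate, hsetsLen']
  have hjlen : L ≤ (seqs[j]).length := hLle _ (List.getElem_mem hj)
  -- LHS to a range filterMap
  have henum : PySem.List.enumerate (pyZipStar seqs)
      = (List.range L).map (fun (p : Nat) => (((p : Nat) : Int), seqs.map (fun t => t.getD p ' '))) := by
    apply List.ext_getElem
    · simp [PySem.List.length_enumerate, hLdef]
    · intro p h1 h2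
      have hpL : p < L := by simpa using h2
      simp [PySem.List.getElem_enumerate, hLdef]
  have hlhs : ((PySem.List.enumerate (pyZipStar seqs)).filterMap (classifyCol vp n)).map
        (fun col => col.getD j 'n')
      = (List.range L).filterMap (fun (p : Nat) =>
          (classifyCol vp n (((p : Nat) : Int), seqs.map (fun t => t.getD p ' '))).map
            (fun col => col.getD j 'n')) := by
    rw [henum, List.filterMap_map, List.map_filterMap]
    rfl
  -- RHS to a range filterMap
  have hzip : (seqs[j]).zip labels
      = (List.range L).map (fun (p : Nat) =>
          ((seqs[j]).getD p ' ', colLabel vp (((p : Nat) : Int), sets.getD p PySem.Set.empty))) := by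
    apply List.ext_getElem
    · simp [hlabLen]; omega
    · intro p h1 h2
      have hpL : p < L := by simpa using h2
      have hpj : p < (seqs[j]).length := by omega
      have hps : p < sets.length := by omega
      simp [List.getElem_zip, hlabels, PySem.List.getElem_enumerate,
        List.getD_eq_getElem?_getD, hpj, hps]
  have hgetDj : seqs.getD j [] = seqs[j] := by
    simp [List.getD_eq_getElem?_getD, List.getElem?_eq_getElem hj]
  rw [hlhs, hgetDj, renderRow_eq_filterMap, hzip, List.filterMap_map]
  apply List.filterMap_congr
  intro p hp
  have hpL : p < L := List.mem_range.mp hp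
  have hpj : p < (seqs[j]).length := by omega
  simp only [Function.comp, classifyCol, colLabel, glen p hpL]
  by_cases h1 : ((p : Nat) : Int) ∈ vp ∨ gaplessCount (List.map (fun t => t.getD p ' ') seqs) = 1
  · -- keep: column's j-th char is taxon j's p-th char
    rw [if_pos h1, if_pos h1]
    simp [List.getD_eq_getElem?_getD, List.getElem?_eq_getElem hj,
      List.getElem?_eq_getElem hpj]
  · by_cases h2 : gaplessCount (List.map (fun t => t.getD p ' ') seqs) > 1
    · -- mask: replicate reads 'n' at any index
      rw [if_neg h1, if_pos h2, if_neg h1, if_pos h2]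
      by_cases hjn : j < n <;>
        simp [List.getD_eq_getElem?_getD, hjn]
    · -- drop
      rw [if_neg h1, if_neg h2, if_neg h1, if_neg h2]
      simp

/-- The column-table form equals B. -/
theorem b_eq_colForm (aln : List (String × String)) (var_positions : List Int) :
    colFormResult aln var_positions = mask_alignment_alt aln var_positions := by
  simp only [colFormResult, mask_alignment_alt]
  set alnD : PySem.Dict String String := PySem.Dict.ofList aln with halnD
  have hkeys : alnD.keys = alnD.items.map Prod.fst := rfl
  have hvals : alnD.values = alnD.items.map Prod.snd := rfl
  apply List.ext_getElem
  · simp [PySem.List.length_enumerate, hkeys]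
  · intro j h1 h2
    have hj : j < alnD.items.length := by
      simpa [PySem.List.length_enumerate, hkeys] using h1
    have hjk : j < alnD.keys.length := by simpa [hkeys] using hj
    have hjs : j < (alnD.values.map String.toList).length := by simpa [hvals] using hj
    simp only [List.getElem_map, PySem.List.getElem_enumerate]
    refine Prod.ext ?_ ?_
    · simp [hkeys]
    · simp only []
      congr 1
      have := core_eq var_positions (alnD.values.map String.toList) alnD.keys.length
        (by simp [hkeys, hvals]) j hjs
      rw [show ((0 : Int) + (j : Int)).toNat = j by simp, this]
      congr 1
      simp [List.getD_eq_getElem?_getD, hvals, List.getElem?_eq_getElem hj]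

-- ===== VERDICT (by name: the statement is the Claim_ definition above) =====
theorem mask_alignment_spec : Claim_equal_mask_alignment := by
  intro aln var_positions _
  exact (a_eq_colForm aln var_positions).trans (b_eq_colForm aln var_positions)
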